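-- pv_equiv track=rewrite | github.com/JackDevilGod/advent-of-code-2024 | 21/main.py | prune
-- ===== SOURCE A (Python) =====
-- def prune(paths: list[list[str]]) -> list[list[str]]:
--     shotest_length = float("inf")
--     retun_list: list[list[str]] = []
--
--     for path in paths:
--         if len(path) < shotest_length:
--             shotest_length = len(path)
--             retun_list = []
--             retun_list.append(path)
--         elif len(path) == shotest_length:
--             retun_list.append(path)
--
--     return retun_list
-- ===== SOURCE B (Python) =====
-- def prune(paths: list[list[str]]) -> list[list[str]]:
--     m = min((len(p) for p in paths), default=None)
--     return [p for p in paths if len(p) == m]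
-- ===== Notes on version B (the rewrite author's own statement) =====
-- stated objective: simpler
-- what changed: Replaces the running-minimum accumulator that rebuilds the result list on each new minimum with a two-pass decomposition: compute the minimum length once, then filter the paths of that length.
import Mathlib
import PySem

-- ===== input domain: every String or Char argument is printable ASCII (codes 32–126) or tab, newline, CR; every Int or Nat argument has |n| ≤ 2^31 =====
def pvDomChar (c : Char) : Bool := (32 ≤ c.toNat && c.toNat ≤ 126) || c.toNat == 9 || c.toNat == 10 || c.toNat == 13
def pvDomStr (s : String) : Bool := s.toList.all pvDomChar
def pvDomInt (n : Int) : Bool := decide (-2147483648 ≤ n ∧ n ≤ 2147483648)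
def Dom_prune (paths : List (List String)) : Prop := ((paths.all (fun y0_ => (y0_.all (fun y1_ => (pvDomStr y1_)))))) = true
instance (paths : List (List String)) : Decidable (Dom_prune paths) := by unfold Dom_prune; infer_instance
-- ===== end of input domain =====

-- B replaces A's running-minimum accumulator (rebuilding the list at each new minimum)
-- by compute-the-minimum-length-then-filter; objective: simpler.


-- ===== PORT A =====
-- loop body of A: state = (shortest length so far as Option (none = float("inf")), result list)
def pruneStep (st : Option Nat × List (List String)) (path : List String) :
    Option Nat × List (List String) :=
  match st with
  | (none, _) => (some path.length, [path])
  | (some m, acc) =>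
    if path.length < m then (some path.length, [path])
    else if path.length == m then (some m, acc ++ [path])
    else (some m, acc)

def prune (paths : List (List String)) : List (List String) :=
  (paths.foldl pruneStep (none, [])).2

-- ===== PORT B =====
-- min(generator, default=None): left fold, none when empty
def pyMinStep (acc : Option Nat) (x : Nat) : Option Nat :=
  match acc with
  | none => some x
  | some m => some (min m x)

def prune_alt (paths : List (List String)) : List (List String) :=
  match (paths.map (fun p => p.length)).foldl pyMinStep none with
  | none => []
  | some m => paths.filter (fun p => p.length == m)

-- ===== PRECONDITION & SPEC =====
def Spec_prune (paths : List (List String)) (out : List (List String)) : Prop := out = prune_alt paths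
instance (paths : List (List String)) (out : List (List String)) : Decidable (Spec_prune paths out) := by unfold Spec_prune; infer_instance

-- ===== CLAIM (what is proved, stated in full; the proofs are below) =====
def Claim_equal_prune : Prop := ∀ (paths : List (List String)), Dom_prune paths → Spec_prune paths (prune paths)

-- ===== LEMMAS AND PROOFS =====

lemma foldl_min_le (l : List (List String)) (m : Nat) :
    List.foldl (fun a (q : List String) => min a q.length) m l ≤ m := by
  induction l generalizing m with
  | nil => simp
  | cons q t ih =>
    simp only [List.foldl_cons]
    exact le_trans (ih (min m q.length)) (min_le_left _ _)

lemma pyMin_some (xs : List Nat) (m : Nat) :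
    xs.foldl pyMinStep (some m) = some (xs.foldl min m) := by
  induction xs generalizing m with
  | nil => rfl
  | cons x t ih => simp [pyMinStep, ih]

lemma loop_some (l : List (List String)) (m : Nat) (acc : List (List String)) :
    List.foldl pruneStep (some m, acc) l =
      (some (List.foldl (fun a (q : List String) => min a q.length) m l),
       if List.foldl (fun a (q : List String) => min a q.length) m l < m
       then l.filter (fun q => q.length == List.foldl (fun a (q : List String) => min a q.length) m l)
       else acc ++ l.filter (fun q => q.length == m)) := by
  induction l generalizing m acc with
  | nil => simp
  | cons q t ih =>
    simp only [List.foldl_cons]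
    rcases lt_trichotomy q.length m with h | h | h
    · -- new minimum
      have hstep : pruneStep (some m, acc) q = (some q.length, [q]) := by
        simp [pruneStep, h]
      rw [hstep, ih]
      have hmin : min m q.length = q.length := by omega
      rw [hmin]
      have hle := foldl_min_le t q.length
      rcases eq_or_lt_of_le hle with he | hlt
      · -- min over t equals q.length
        simp [he, h]
      · have hne : (q.length == List.foldl (fun a (q : List String) => min a q.length) q.length t) = false := by
          simp; omega
        simp only [hlt, if_pos (lt_trans hlt h), List.filter_cons, hne]
        simp
    · -- equal: append
      have hstep : pruneStep (some m, acc) q = (some m, acc ++ [q]) := by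
        simp [pruneStep, h]
      rw [hstep, ih]
      have hmin : min m q.length = m := by omega
      rw [hmin]
      have hle := foldl_min_le t m
      rcases eq_or_lt_of_le hle with he | hlt
      · simp [he, h]
      · have hne : (q.length == List.foldl (fun a (q : List String) => min a q.length) m t) = false := by
          simp; omega
        simp [hlt, hne]
    · -- longer: skip
      have hstep : pruneStep (some m, acc) q = (some m, acc) := by
        have h1 : ¬ q.length < m := by omega
        have h2 : (q.length == m) = false := by simp; omega
        simp [pruneStep, h1, h2]
      rw [hstep, ih]
      have hmin : min m q.length = m := by omega
      rw [hmin]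
      have hle := foldl_min_le t m
      have hne2 : (q.length == m) = false := by simp; omega
      rcases eq_or_lt_of_le hle with he | hlt
      · simp [he, hne2]
      · have hne : (q.length == List.foldl (fun a (q : List String) => min a q.length) m t) = false := by
          simp; omega
        simp [hlt, hne]

-- ===== VERDICT (by name: the statement is the Claim_ definition above) =====
theorem prune_spec : Claim_equal_prune := by
  intro paths _
  unfold Spec_prune prune prune_alt
  cases paths with
  | nil => rfl
  | cons p rest =>
    simp only [List.foldl_cons, List.map_cons, pyMinStep]
    have hA : pruneStep (none, ([] : List (List String))) p = (some p.length, [p]) := rfl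
    rw [hA, loop_some, pyMin_some, List.foldl_map]
    have hle := foldl_min_le rest p.length
    rcases eq_or_lt_of_le hle with he | hlt
    · simp [he]
    · have hne : (p.length == List.foldl (fun a (q : List String) => min a q.length) p.length rest) = false := by
        simp; omega
      simp [hlt, hne]
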